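-- pv_equiv track=rewrite | github.com/nanshe-org/nanshe | nanshe/util/iters.py | splitting_xrange
-- ===== SOURCE A (Python) =====
-- import itertools
-- import math
--
-- def splitting_xrange(a, b=None):
--     """
--         Similar to xrange except that it recursively proceeds through the given
--         range in such a way that values that follow each other are preferably
--         not only non-sequential, but fairly different. This does not always
--         work with small ranges, but works nicely with large ranges.
--
--         Args:
--             a(int):              the lower bound of the range
--             b(int):              the upper bound of the range
--
--         Returns:
--             result(generator):   a generator that can be used to iterate
--                                  through the sequence.
--
--         Examples:
--             >>> splitting_xrange(0, 0) #doctest: +ELLIPSIS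
--             <generator object splitting_xrange at 0x...>
--
--             >>> list(splitting_xrange(0, 0))
--             []
--
--             >>> list(splitting_xrange(5, 5))
--             []
--
--             >>> list(splitting_xrange(5, 0))
--             []
--
--             >>> list(splitting_xrange(0, 1))
--             [0]
--
--             >>> list(splitting_xrange(0, 2))
--             [0, 1]
--
--             >>> list(splitting_xrange(0, 3))
--             [0, 2, 1]
--
--             >>> list(splitting_xrange(10))
--             [0, 5, 8, 3, 9, 4, 6, 1, 7, 2]
--
--             >>> list(splitting_xrange(0, 10))
--             [0, 5, 8, 3, 9, 4, 6, 1, 7, 2]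
--     """
--
--     def splitting_xrange_helper(a, b):
--         if a != b:
--             half_diff = (b - a) / 2.0
--
--             mid_1 = int(a + math.floor(half_diff))
--             mid_2 = int(a + math.ceil(half_diff))
--
--             if a < mid_1 and b > mid_2:
--                 yield(mid_2)
--
--                 for _1, _2 in itertools.izip(
--                         splitting_xrange_helper(a, mid_1),
--                         splitting_xrange_helper(mid_2, b)
--                 ):
--                     yield(_2)
--                     yield(_1)
--
--                 if mid_1 != mid_2:
--                     yield(mid_1)
--             elif a < mid_1:
--                 for _2 in splitting_xrange_helper(mid_1, b):
--                     yield(_2)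
--             elif b > mid_2:
--                 for _1 in splitting_xrange_helper(a, mid_2):
--                     yield(_1)
--
--     if b is None:
--         b = a
--         a = 0
--
--     a = int(a)
--     b = int(b)
--
--     if a >= b:
--         return
--
--     yield(a)
--
--     for each in splitting_xrange_helper(a, b):
--         yield(each)
-- ===== SOURCE B (Python) =====
-- def splitting_xrange(a, b=None):
--     """Bisection-interleaved permutation of range(a, b), computed by a direct
--     per-element position formula: for each k, an iterative midpoint descent
--     computes k's output index, and k is scattered into a preallocated list
--     (no recursion, no generator interleaving)."""
--     if b is None:
--         a, b = 0, a
--     a = int(a)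
--     b = int(b)
--     if a >= b:
--         return
--     n = b - a
--     out = [0] * n
--     out[0] = a
--     for k in range(a + 1, b):
--         lo, hi = a, b
--         idx, scale = 1, 1
--         while True:
--             d = hi - lo
--             m1 = lo + d // 2
--             m2 = lo + (d + 1) // 2
--             if k == m2:
--                 break
--             if k == m1:
--                 idx += scale * (d - 2)
--                 break
--             if k > m2:
--                 idx += scale
--                 lo = m2
--             else:
--                 idx += 2 * scale
--                 hi = m1
--             scale *= 2
--         out[idx] = k
--     for each in out:
--         yield each
-- ===== Notes on version B (the rewrite author's own statement) =====
-- stated objective: alternative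
-- what changed: A schedules nested recursive generators and interleaves two child streams lockstep via izip; B never builds the recursion tree's lists: it computes each value's output position directly by an iterative midpoint-descent (accumulating index and scale), and scatters the values into a preallocated array.
import Mathlib
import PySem

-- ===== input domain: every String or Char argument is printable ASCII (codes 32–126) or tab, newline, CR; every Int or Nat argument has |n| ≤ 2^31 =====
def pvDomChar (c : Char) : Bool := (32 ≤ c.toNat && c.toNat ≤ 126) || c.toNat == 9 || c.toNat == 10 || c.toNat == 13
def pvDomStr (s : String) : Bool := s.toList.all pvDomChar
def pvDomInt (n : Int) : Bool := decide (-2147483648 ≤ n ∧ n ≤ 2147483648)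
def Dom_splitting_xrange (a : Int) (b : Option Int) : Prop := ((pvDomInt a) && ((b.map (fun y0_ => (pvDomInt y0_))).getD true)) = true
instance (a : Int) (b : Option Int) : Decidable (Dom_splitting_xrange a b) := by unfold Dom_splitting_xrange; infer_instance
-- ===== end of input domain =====

-- B replaces A's recursive interleaving generators by a direct per-element position
-- computation: an iterative midpoint descent gives each value its output index and the
-- values are scattered into a preallocated list (objective: alternative, no speed claim).
-- Equivalence is about the listed elements of the returned generator/iterator.

-- ===== PORT A =====
-- transliteration of the inner generator 'splitting_xrange_helper', as the list of values it yields.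
-- A computes the midpoints with float arithmetic (math.floor/math.ceil of (b-a)/2.0); on the
-- |n| ≤ 2^31 domain those floats are exact, equal to floor resp. ceil integer division by 2;
-- ceil(d/2) is ported exactly as -((-d) // 2).
def splitting_xrange_helperA (fuel : Nat) (a b : Int) : List Int :=
  match fuel with
  | 0 => []      -- fuel guard only: the wrapper passes (b - a).toNat, which bounds the recursion depth
  | fuel + 1 =>
    if a ≠ b then
      let mid_1 : Int := a + PySem.Int.floordiv (b - a) 2
      let mid_2 : Int := a + (-(PySem.Int.floordiv (-(b - a)) 2))
      if a < mid_1 ∧ b > mid_2 then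
        -- yield mid_2; for (_1,_2) in izip(left, right): yield _2; yield _1; then maybe mid_1
        mid_2 ::
          ((List.zip (splitting_xrange_helperA fuel a mid_1) (splitting_xrange_helperA fuel mid_2 b)).flatMap
            (fun p => [p.2, p.1]))
          ++ (if mid_1 ≠ mid_2 then [mid_1] else [])
      else if a < mid_1 then
        splitting_xrange_helperA fuel mid_1 b
      else if b > mid_2 then
        splitting_xrange_helperA fuel a mid_2
      else []
    else []

def splitting_xrange (a : Int) (b : Option Int) : List Int :=
  let ab : Int × Int := match b with
    | none => (0, a)       -- if b is None: b = a; a = 0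
    | some b' => (a, b')
  if ab.1 ≥ ab.2 then []
  else ab.1 :: splitting_xrange_helperA (ab.2 - ab.1).toNat ab.1 ab.2

-- ===== PORT B =====
-- transliteration of Source B's 'while True' index-descent loop; the loop strictly shrinks
-- hi - lo, so fuel (hi - lo).toNat at the call site bounds the iterations.
def pvIdxLoopB (fuel : Nat) (k lo hi idx scale : Int) : Int :=
  match fuel with
  | 0 => idx      -- fuel guard only, never reached on the inputs B feeds it
  | fuel + 1 =>
    let d := hi - lo
    let m1 : Int := lo + PySem.Int.floordiv d 2
    let m2 : Int := lo + PySem.Int.floordiv (d + 1) 2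
    if k = m2 then idx
    else if k = m1 then idx + scale * (d - 2)
    else if k > m2 then pvIdxLoopB fuel k m2 hi (idx + scale) (scale * 2)
    else pvIdxLoopB fuel k lo m1 (idx + 2 * scale) (scale * 2)

-- transliteration of Source B's wrapper: out = [0]*n; out[0] = a; scatter each k at its index.
-- 'out[idx] = k' is ported as List.set (exact here: on every reached input 0 ≤ idx < n,
-- which the equivalence proof below establishes).
def splitting_xrange_alt (a : Int) (b : Option Int) : List Int :=
  let ab : Int × Int := match b with
    | none => (0, a)
    | some b' => (a, b')
  let a := ab.1
  let b := ab.2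
  if a ≥ b then []
  else
    let n := b - a
    let out0 := (List.replicate n.toNat (0 : Int)).set 0 a
    (PySem.List.pyRange (a + 1) b 1).foldl
      (fun o k => o.set (pvIdxLoopB (b - a).toNat k a b 1 1).toNat k) out0

-- ===== PRECONDITION & SPEC =====
-- A is total (the behavioural harness provides itertools.izip = zip), so no Pre_ is needed.
def Spec_splitting_xrange (a : Int) (b : Option Int) (out : List Int) : Prop := out = splitting_xrange_alt a b
instance (a : Int) (b : Option Int) (out : List Int) : Decidable (Spec_splitting_xrange a b out) := by unfold Spec_splitting_xrange; infer_instance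

-- ===== CLAIM (what is proved, stated in full; the proofs are below) =====
def Claim_equal_splitting_xrange : Prop := ∀ (a : Int) (b : Option Int), Dom_splitting_xrange a b → Spec_splitting_xrange a b (splitting_xrange a b)

-- ===== LEMMAS AND PROOFS =====

-- bounds of floor division by 2
theorem pvHalfBound (x : Int) : 2 * PySem.Int.floordiv x 2 ≤ x ∧ x < 2 * PySem.Int.floordiv x 2 + 2 := by
  have h1 := PySem.Int.floordiv_mul_add_mod x 2
  have h2 := PySem.Int.mod_nonneg x (b := 2) (by decide)
  have h3 := PySem.Int.mod_lt x (b := 2) (by decide)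
  omega

-- A's float ceiling, ported as -((-d)//2), equals B's integer ceiling (d+1)//2
theorem ceil_half_eq (d : Int) : -(PySem.Int.floordiv (-d) 2) = PySem.Int.floordiv (d + 1) 2 := by
  have h1 := pvHalfBound (-d)
  have h2 := pvHalfBound (d + 1)
  omega

-- the output rank of k inside helper(lo, hi), in the shape of B's descent loop
def pvRank (fuel : Nat) (lo hi k : Int) : Int :=
  match fuel with
  | 0 => 0
  | fuel + 1 =>
    let d := hi - lo
    let m1 : Int := lo + PySem.Int.floordiv d 2
    let m2 : Int := lo + PySem.Int.floordiv (d + 1) 2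
    if k = m2 then 0
    else if k = m1 then d - 2
    else if k > m2 then 1 + 2 * pvRank fuel m2 hi k
    else 2 + 2 * pvRank fuel lo m1 k

-- last-write-wins description of the scatter fold
theorem foldl_set_get (f : Int → Nat) (ks : List Int) : ∀ (init : List Int) (i : Nat),
    (ks.foldl (fun o k => o.set (f k) k) init)[i]? =
      match ks.reverse.find? (fun k => f k == i) with
      | some k => if i < init.length then some k else none
      | none => init[i]? := by
  induction ks with
  | nil => intro init i; simp
  | cons k ks ih =>
    intro init i
    rw [List.foldl_cons, ih, List.reverse_cons, List.find?_append]
    cases hf : ks.reverse.find? (fun k => f k == i) with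
    | some k' => simp [List.length_set]
    | none =>
      by_cases hi : f k = i
      · simp [hi, List.getElem?_set]
      · simp [hi]

theorem idxLoop_eq_rank (fuel : Nat) : ∀ lo hi k idx scale : Int, lo < k → k < hi →
    (hi - lo).toNat ≤ fuel →
    pvIdxLoopB fuel k lo hi idx scale = idx + scale * pvRank fuel lo hi k := by
  induction fuel with
  | zero => intro lo hi k idx scale h1 h2 hf; omega
  | succ f ih =>
    intro lo hi k idx scale h1 h2 hf
    have hF := pvHalfBound (hi - lo)
    have hC := pvHalfBound (hi - lo + 1)
    simp only [pvIdxLoopB, pvRank]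
    split_ifs with e1 e2 e3
    · ring
    · ring
    · rw [ih _ _ _ _ _ (by omega) h2 (by omega)]
      ring
    · rw [ih _ _ _ _ _ h1 (by omega) (by omega)]
      ring


theorem rank_bounds (fuel : Nat) : ∀ lo hi k : Int, lo < k → k < hi → (hi - lo).toNat ≤ fuel →
    0 ≤ pvRank fuel lo hi k ∧ pvRank fuel lo hi k ≤ hi - lo - 2 := by
  induction fuel with
  | zero => intro lo hi k h1 h2 hf; omega
  | succ f ih =>
    intro lo hi k h1 h2 hf
    have hF := pvHalfBound (hi - lo)
    have hC := pvHalfBound (hi - lo + 1)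
    simp only [pvRank]
    split_ifs with e1 e2 e3
    · omega
    · omega
    · have := ih _ _ _ (by omega : lo + PySem.Int.floordiv (hi - lo + 1) 2 < k) h2 (by omega)
      omega
    · have := ih _ _ _ h1 (by omega : k < lo + PySem.Int.floordiv (hi - lo) 2) (by omega)
      omega

theorem weave_len (l : List (Int × Int)) :
    (l.flatMap (fun p => [p.2, p.1])).length = 2 * l.length := by
  induction l with
  | nil => rfl
  | cons p l ih => simp [ih]; omega

theorem weave_get_even (xs ys : List Int) (h : xs.length = ys.length) (j : Nat) :
    ((List.zip xs ys).flatMap (fun p => [p.2, p.1]))[2 * j]? = ys[j]? := by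
  induction xs generalizing ys j with
  | nil => cases ys with
    | nil => simp
    | cons y ys => simp at h
  | cons x xs ih =>
    cases ys with
    | nil => simp at h
    | cons y ys =>
      cases j with
      | zero => simp
      | succ j =>
        have h2 : 2 * (j + 1) = 2 * j + 1 + 1 := by ring
        rw [h2]
        simpa using ih ys (by simpa using h) j

theorem weave_get_odd (xs ys : List Int) (h : xs.length = ys.length) (j : Nat) :
    ((List.zip xs ys).flatMap (fun p => [p.2, p.1]))[2 * j + 1]? = xs[j]? := by
  induction xs generalizing ys j with
  | nil => cases ys with
    | nil => simp
    | cons y ys => simp at h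
  | cons x xs ih =>
    cases ys with
    | nil => simp at h
    | cons y ys =>
      cases j with
      | zero => simp
      | succ j =>
        have h2 : 2 * (j + 1) + 1 = 2 * j + 1 + 1 + 1 := by ring
        rw [h2]
        simpa using ih ys (by simpa using h) j

theorem helper_len (fuel : Nat) : ∀ a b : Int, a < b → (b - a).toNat ≤ fuel →
    (splitting_xrange_helperA fuel a b).length = (b - a - 1).toNat := by
  induction fuel with
  | zero => intro a b h1 hf; omega
  | succ f ih =>
    intro a b h1 hf
    have hF := pvHalfBound (b - a)
    have hC := pvHalfBound (b - a + 1)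
    simp only [splitting_xrange_helperA]
    rw [ceil_half_eq]
    rw [if_pos (by omega : a ≠ b)]
    by_cases hd : 2 ≤ b - a
    · rw [if_pos (by constructor <;> omega)]
      simp only [List.length_cons, List.length_append, weave_len, List.length_zip]
      rw [ih _ _ (by omega) (by omega), ih _ _ (by omega) (by omega)]
      split_ifs with e4
      · simp only [List.length_singleton]; omega
      · simp only [List.length_nil]; omega
    · -- b - a = 1
      rw [if_neg (by omega), if_neg (by omega), if_neg (by omega)]
      simp only [List.length_nil]; omega

theorem helper_get (fuel : Nat) : ∀ a b k : Int, a < k → k < b → (b - a).toNat ≤ fuel →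
    (splitting_xrange_helperA fuel a b)[(pvRank fuel a b k).toNat]? = some k := by
  induction fuel with
  | zero => intro a b k h1 h2 hf; omega
  | succ f ih =>
    intro a b k h1 h2 hf
    have hF := pvHalfBound (b - a)
    have hC := pvHalfBound (b - a + 1)
    have hd : 2 ≤ b - a := by omega
    simp only [splitting_xrange_helperA, pvRank]
    rw [ceil_half_eq]
    rw [if_pos (by omega : a ≠ b), if_pos (by constructor <;> omega)]
    set F := PySem.Int.floordiv (b - a) 2 with hFdef
    set C := PySem.Int.floordiv (b - a + 1) 2 with hCdef
    set L := splitting_xrange_helperA f a (a + F) with hLdef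
    set R := splitting_xrange_helperA f (a + C) b with hRdef
    set W := (List.zip L R).flatMap (fun p => [p.2, p.1]) with hWdef
    have lenL : L.length = (a + F - a - 1).toNat := helper_len f a (a + F) (by omega) (by omega)
    have lenR : R.length = (b - (a + C) - 1).toNat := helper_len f (a + C) b (by omega) (by omega)
    have hlen : L.length = R.length := by omega
    have wlen : W.length = 2 * (a + F - a - 1).toNat := by
      rw [hWdef, weave_len, List.length_zip]
      omega
    by_cases e1 : k = a + C
    · rw [if_pos e1]
      rw [show ((0 : Int)).toNat = 0 from rfl]
      rw [List.getElem?_append_left (by simp)]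
      simp [e1]
    · rw [if_neg e1]
      by_cases e2 : k = a + F
      · rw [if_pos e2]
        have hFC : F ≠ C := by
          intro h
          exact e1 (by omega)
        rw [if_pos (by omega : a + F ≠ a + C)]
        have hLW : ((a + C) :: W).length = (b - a - 2).toNat := by
          simp only [List.length_cons]
          omega
        rw [← hLW, List.getElem?_concat_length, e2]
      · rw [if_neg e2]
        by_cases e3 : a + C < k
        · rw [if_pos e3]
          have hr := rank_bounds f (a + C) b k e3 h2 (by omega)
          have hIH := ih (a + C) b k e3 h2 (by omega)
          have hrlt : (pvRank f (a + C) b k).toNat < R.length := by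
            rcases List.getElem?_eq_some_iff.mp hIH with ⟨hlt, _⟩
            exact hlt
          have hidx : (1 + 2 * pvRank f (a + C) b k).toNat = 2 * (pvRank f (a + C) b k).toNat + 1 := by omega
          rw [hidx]
          rw [List.getElem?_append_left (by simp only [List.length_cons]; omega)]
          rw [List.getElem?_cons_succ, weave_get_even _ _ hlen]
          exact hIH
        · rw [if_neg e3]
          have hk : k < a + F := by omega
          have hr := rank_bounds f a (a + F) k h1 hk (by omega)
          have hIH := ih a (a + F) k h1 hk (by omega)
          have hrlt : (pvRank f a (a + F) k).toNat < L.length := by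
            rcases List.getElem?_eq_some_iff.mp hIH with ⟨hlt, _⟩
            exact hlt
          have hidx : (2 + 2 * pvRank f a (a + F) k).toNat = (2 * (pvRank f a (a + F) k).toNat + 1) + 1 := by omega
          rw [hidx]
          rw [List.getElem?_append_left (by simp only [List.length_cons]; omega)]
          rw [List.getElem?_cons_succ, weave_get_odd _ _ hlen]
          exact hIH

theorem core_scatter (a b : Int) (h : a < b) :
    (PySem.List.pyRange (a + 1) b 1).foldl
      (fun o k => o.set (pvIdxLoopB (b - a).toNat k a b 1 1).toNat k)
      ((List.replicate (b - a).toNat 0).set 0 a)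
    = a :: splitting_xrange_helperA (b - a).toNat a b := by
  set F : Nat := (b - a).toNat with hFdef
  set p : Int → Nat := fun k => (pvIdxLoopB F k a b 1 1).toNat with hpdef
  set ks := PySem.List.pyRange (a + 1) b 1 with hksdef
  have hmem : ∀ k ∈ ks, a < k ∧ k < b := by
    intro k hk
    have := PySem.List.mem_pyRange_one.mp hk
    omega
  have hpk : ∀ k, a < k → k < b → p k = (pvRank F a b k).toNat + 1 := by
    intro k h1 h2
    have hb := rank_bounds F a b k h1 h2 (by omega)
    simp only [hpdef]
    rw [idxLoop_eq_rank F a b k 1 1 h1 h2 (by omega)]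
    omega
  have hlenH : (splitting_xrange_helperA F a b).length = (b - a - 1).toNat :=
    helper_len F a b h (by omega)
  have hTget : ∀ k, a < k → k < b → (a :: splitting_xrange_helperA F a b)[p k]? = some k := by
    intro k h1 h2
    rw [hpk k h1 h2, List.getElem?_cons_succ]
    exact helper_get F a b k h1 h2 (by omega)
  have hpbound : ∀ k, a < k → k < b → 1 ≤ p k ∧ p k ≤ (b - a - 1).toNat := by
    intro k h1 h2
    have hb := rank_bounds F a b k h1 h2 (by omega)
    rw [hpk k h1 h2]
    omega
  -- surjectivity of p : ks → [1, (b-a-1).toNat]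
  have hsurj : ∀ i : Nat, 1 ≤ i → i ≤ (b - a - 1).toNat → ∃ k ∈ ks, p k = i := by
    intro i hi1 hi2
    have hnd : (ks.map p).Nodup := by
      refine List.Nodup.map_on ?_ (by rw [hksdef]; exact PySem.List.nodup_pyRange_one _ _)
      intro x hx y hy hxy
      obtain ⟨hx1, hx2⟩ := hmem x hx
      obtain ⟨hy1, hy2⟩ := hmem y hy
      have := (hTget x hx1 hx2).symm.trans (hxy ▸ hTget y hy1 hy2)
      exact Option.some_inj.mp this
    have hsub : (ks.map p).toFinset ⊆ Finset.Icc 1 ((b - a - 1).toNat) := by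
      intro x hx
      rw [List.mem_toFinset, List.mem_map] at hx
      obtain ⟨k, hk, rfl⟩ := hx
      obtain ⟨h1, h2⟩ := hmem k hk
      have := hpbound k h1 h2
      rw [Finset.mem_Icc]
      omega
    have hcard : (Finset.Icc 1 ((b - a - 1).toNat)).card ≤ (ks.map p).toFinset.card := by
      rw [List.toFinset_card_of_nodup hnd, List.length_map, hksdef,
        PySem.List.length_pyRange_one, Nat.card_Icc]
      omega
    have heq := Finset.eq_of_subset_of_card_le hsub hcard
    have : i ∈ (ks.map p).toFinset := by
      rw [heq, Finset.mem_Icc]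
      omega
    rw [List.mem_toFinset, List.mem_map] at this
    obtain ⟨k, hk, hki⟩ := this
    exact ⟨k, hk, hki⟩
  -- pointwise equality
  apply List.ext_getElem?
  intro i
  rw [foldl_set_get (fun k => (pvIdxLoopB F k a b 1 1).toNat) ks]
  have hinitlen : ((List.replicate F (0 : Int)).set 0 a).length = F := by simp
  have hTlen : (a :: splitting_xrange_helperA F a b).length = F := by
    simp [hlenH]; omega
  cases hfind : ks.reverse.find? (fun k => (pvIdxLoopB F k a b 1 1).toNat == i) with
  | some k =>
    have hk : k ∈ ks := by
      have := List.mem_of_find?_eq_some hfind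
      rwa [List.mem_reverse] at this
    have hpi : p k = i := by
      have := List.find?_some hfind
      simpa using this
    obtain ⟨h1, h2⟩ := hmem k hk
    have hb := hpbound k h1 h2
    show (if i < ((List.replicate F (0:Int)).set 0 a).length then some k else none)
        = (a :: splitting_xrange_helperA F a b)[i]?
    rw [hinitlen]
    rw [if_pos (by omega : i < F)]
    rw [← hpi]
    exact (hTget k h1 h2).symm
  | none =>
    rw [List.find?_eq_none] at hfind
    show ((List.replicate F (0:Int)).set 0 a)[i]? = (a :: splitting_xrange_helperA F a b)[i]?
    rcases Nat.lt_or_ge i F with hiF | hiF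
    · rcases Nat.eq_zero_or_pos i with hi0 | hip
      · subst hi0
        rw [List.getElem?_set]
        simp [show 0 < F by omega]
      · -- 1 ≤ i < F: contradiction with surjectivity
        obtain ⟨k, hk, hki⟩ := hsurj i hip (by omega)
        exact absurd (by simpa using hki) (hfind k (List.mem_reverse.mpr hk))
    · rw [List.getElem?_eq_none (by omega : ((List.replicate F (0:Int)).set 0 a).length ≤ i),
        List.getElem?_eq_none (by omega : (a :: splitting_xrange_helperA F a b).length ≤ i)]

-- ===== VERDICT (by name: the statement is the Claim_ definition above) =====
theorem splitting_xrange_spec : Claim_equal_splitting_xrange := by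
  unfold Claim_equal_splitting_xrange
  intro a b _
  unfold Spec_splitting_xrange splitting_xrange splitting_xrange_alt
  cases b with
  | none =>
    by_cases h : (0 : Int) ≥ a
    · simp [h]
    · simp only [ge_iff_le, not_le] at h
      simp only [if_neg (by omega : ¬ ((0:Int),a).1 ≥ ((0:Int),a).2)]
      exact (core_scatter 0 a h).symm
  | some b' =>
    by_cases h : a ≥ b'
    · simp [h]
    · simp only [ge_iff_le, not_le] at h
      simp only [if_neg (by omega : ¬ (a,b').1 ≥ (a,b').2)]
      exact (core_scatter a b' h).symm
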